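-- pv_equiv track=rewrite | github.com/ethyca/fides | src/fides/api/ctl/database/seed.py | filter_data_categories
-- ===== SOURCE A (Python) =====
-- from typing import List
--
-- def filter_data_categories(
--     categories: List[str], excluded_categories: List[str]
-- ) -> List[str]:
--     """
--     Filter data categories and their children out of a list of categories.
--
--     We only want user-related data categories, but not the parent category
--     We also only want 2nd level categories, otherwise there are policy conflicts
--     """
--     user_categories = [
--         category
--         for category in categories
--         if category.startswith("user.") and len(category.split(".")) < 3
--     ]
--     if excluded_categories:
--         duplicated_categories = [
--             category
--             for excluded_category in excluded_categories
--             for category in user_categories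
--             if not category.startswith(excluded_category)
--         ]
--         default_categories = {
--             category
--             for category in duplicated_categories
--             if duplicated_categories.count(category) == len(excluded_categories)
--         }
--         return sorted(list(default_categories))
--     return sorted(user_categories)
-- ===== SOURCE B (Python) =====
-- def filter_data_categories(categories, excluded_categories):
--     user_categories = [
--         c for c in categories
--         if c.startswith("user.") and len(c.split(".")) < 3
--     ]
--     if not excluded_categories:
--         return sorted(user_categories)
--     to_remove = {
--         c for c in user_categories
--         if any(c.startswith(e) for e in excluded_categories)
--     }
--     return sorted(set(user_categories) - to_remove)
-- ===== Notes on version B (the rewrite author's own statement) =====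
-- stated objective: simpler
-- what changed: B replaces A's nested excluded×user comprehension plus multiplicity-count inclusion test with a direct decomposition: build the removal set of user categories matching some excluded prefix, then return the sorted set difference.
-- intended difference: When excluded_categories is non-empty and a kept user.* category occurs with multiplicity k where (k*m = len(excluded)) differs from (m = len(excluded)) (m = number of excluded prefixes it does not match) — i.e. on duplicated user categories — A's count test silently drops duplicated categories that match no excluded prefix (e.g. ['user.a','user.a'],['x'] -> []) and can keep ones that do match, while B returns exactly the user categories matching no excluded prefix (['user.a']), which is the intended filter. — e.g. on filter_data_categories(["user.a", "user.a"], ["x"]): A returns [], B returns ["user.a"]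
import Mathlib
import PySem

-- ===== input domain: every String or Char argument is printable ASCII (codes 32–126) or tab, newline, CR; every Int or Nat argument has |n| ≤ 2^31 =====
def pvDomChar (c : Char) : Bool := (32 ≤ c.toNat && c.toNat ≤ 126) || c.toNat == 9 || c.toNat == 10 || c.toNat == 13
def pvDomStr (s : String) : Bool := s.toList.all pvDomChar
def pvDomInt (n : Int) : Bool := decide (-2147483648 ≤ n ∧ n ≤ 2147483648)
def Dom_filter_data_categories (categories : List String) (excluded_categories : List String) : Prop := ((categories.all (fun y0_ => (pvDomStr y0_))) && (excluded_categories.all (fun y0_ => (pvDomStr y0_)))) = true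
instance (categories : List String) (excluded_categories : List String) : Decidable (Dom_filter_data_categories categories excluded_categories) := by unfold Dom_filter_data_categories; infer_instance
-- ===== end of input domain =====

-- B replaces A's multiplicity-count inclusion trick with an exclusion-set-then-set-difference
-- decomposition (simpler); on duplicated user categories with a non-empty exclusion list A's
-- count test gives the wrong answer, stated below as the intended difference D_.


-- shared helper: category.startswith("user.") and len(category.split(".")) < 3
def pvIsUser (c : String) : Bool :=
  PySem.Str.startswith c "user." && decide (((PySem.Str.split? c ".").getD []).length < 3)

-- ===== PORT A =====
def filter_data_categories (categories : List String) (excluded_categories : List String) : List String :=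
  let user_categories := categories.filter pvIsUser
  if excluded_categories ≠ [] then
    let duplicated_categories :=
      excluded_categories.foldl
        (fun acc excluded_category =>
          acc ++ user_categories.filter (fun c => !PySem.Str.startswith c excluded_category)) []
    let default_categories : PySem.Set String :=
      PySem.Set.ofList (duplicated_categories.filter
        (fun c => duplicated_categories.count c == excluded_categories.length))
    PySem.List.sorted default_categories (fun x => x) false
  else
    PySem.List.sorted user_categories (fun x => x) false

-- ===== PORT B =====
def filter_data_categories_alt (categories : List String) (excluded_categories : List String) : List String :=
  let user_categories := categories.filter pvIsUser
  if excluded_categories = [] then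
    PySem.List.sorted user_categories (fun x => x) false
  else
    let to_remove : PySem.Set String :=
      PySem.Set.ofList (user_categories.filter
        (fun c => excluded_categories.any (fun e => PySem.Str.startswith c e)))
    PySem.List.sorted (PySem.Set.diff (PySem.Set.ofList user_categories) to_remove) (fun x => x) false

-- ===== PRECONDITION & SPEC =====
-- pvNp c e : the excluded prefix e is NOT a prefix of c
def pvNp (c e : String) : Bool := !e.toList.isPrefixOf c.toList

-- On inputs with a non-empty exclusion list containing a duplicated user category c whose
-- multiplicity k = categories.count c and non-matching-prefix count m satisfy
-- len(excluded) = m or len(excluded) = k*m, A's count-based test returns the wrong set (it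
-- drops duplicated categories matching no excluded prefix and can keep ones that do match),
-- while B returns exactly the user categories matching no excluded prefix, which is the
-- intended filter.
def D_filter_data_categories (categories : List String) (excluded_categories : List String) : Prop :=
  excluded_categories ≠ [] ∧ ∃ c ∈ categories, pvIsUser c = true ∧ 2 ≤ categories.count c ∧
    excluded_categories.length ∈
      [excluded_categories.countP (pvNp c), categories.count c * excluded_categories.countP (pvNp c)]
instance (categories : List String) (excluded_categories : List String) : Decidable (D_filter_data_categories categories excluded_categories) := by unfold D_filter_data_categories; infer_instance

def Spec_filter_data_categories (categories : List String) (excluded_categories : List String) (out : List String) : Prop := ¬ D_filter_data_categories categories excluded_categories → out = filter_data_categories_alt categories excluded_categories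
instance (categories : List String) (excluded_categories : List String) (out : List String) : Decidable (Spec_filter_data_categories categories excluded_categories out) := by unfold Spec_filter_data_categories; infer_instance

def pvDiffWitness_filter_data_categories : List String × List String := (["user.a", "user.a"], ["x"])
def pvDiffWitnessOut_filter_data_categories : (List String) × (List String) := ([], ["user.a"])

-- ===== CLAIM (what is proved, stated in full; the proofs are below) =====
def Claim_unchanged_filter_data_categories : Prop := ∀ (categories : List String) (excluded_categories : List String), Dom_filter_data_categories categories excluded_categories → Spec_filter_data_categories categories excluded_categories (filter_data_categories categories excluded_categories)
def Claim_changed_filter_data_categories : Prop := Dom_filter_data_categories (pvDiffWitness_filter_data_categories.1) (pvDiffWitness_filter_data_categories.2) ∧ D_filter_data_categories (pvDiffWitness_filter_data_categories.1) (pvDiffWitness_filter_data_categories.2) ∧ filter_data_categories (pvDiffWitness_filter_data_categories.1) (pvDiffWitness_filter_data_categories.2) = pvDiffWitnessOut_filter_data_categories.1 ∧ filter_data_categories_alt (pvDiffWitness_filter_data_categories.1) (pvDiffWitness_filter_data_categories.2) = pvDiffWitnessOut_filter_data_categories.2 ∧ pvDiffWitnessOut_filter_data_categories.1 ≠ pv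DiffWitnessOut_filter_data_categories.2
def Claim_exact_filter_data_categories : Prop := ∀ (categories : List String) (excluded_categories : List String), Dom_filter_data_categories categories excluded_categories → D_filter_data_categories categories excluded_categories → filter_data_categories categories excluded_categories ≠ filter_data_categories_alt categories excluded_categories

-- ===== LEMMAS AND PROOFS =====

-- proof-side abbreviations: multiplicity among kept user categories, non-matching count
def pvK (categories : List String) (c : String) : Nat :=
  categories.countP (fun x => x == c && pvIsUser x)
def pvM (excluded_categories : List String) (c : String) : Nat :=
  excluded_categories.countP (fun e => !decide (e.toList <+: c.toList))

lemma isPrefixOf_eq_decide (p s : List Char) : p.isPrefixOf s = decide (p <+: s) := by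
  cases hd : decide (p <+: s) with
  | true => exact List.isPrefixOf_iff_prefix.mpr (of_decide_eq_true hd)
  | false =>
    exact Bool.eq_false_iff.mpr
      (fun hh => absurd (List.isPrefixOf_iff_prefix.mp hh) (of_decide_eq_false hd))

lemma pvNp_countP_eq (exc : List String) (c : String) :
    exc.countP (pvNp c) = pvM exc c := by
  rw [pvM]
  apply List.countP_congr
  intro e _
  rw [pvNp, isPrefixOf_eq_decide]

-- Python s.startswith(p) is the list-prefix relation
lemma sw_eq_decide (s p : String) : PySem.Str.startswith s p = decide (p.toList <+: s.toList) := by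
  cases hd : decide (p.toList <+: s.toList) with
  | true =>
    rw [PySem.Str.startswith_eq]
    exact (PySem.Chars.startswith_iff _ _).mpr (of_decide_eq_true hd)
  | false =>
    rw [PySem.Str.startswith_eq]
    exact Bool.eq_false_iff.mpr
      (fun hh => absurd ((PySem.Chars.startswith_iff _ _).mp hh) (of_decide_eq_false hd))

lemma pvK_eq (categories : List String) (c : String) :
    pvK categories c = (categories.filter pvIsUser).count c := by
  rw [pvK, List.count, List.countP_filter]

lemma count_eq_pvK (categories : List String) (c : String) (hu : pvIsUser c = true) :
    categories.count c = pvK categories c := by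
  rw [pvK_eq, List.count_filter hu]

lemma D_iff (cats exc : List String) :
    D_filter_data_categories cats exc ↔
      (exc ≠ [] ∧ ∃ c ∈ cats, pvIsUser c = true ∧ 2 ≤ pvK cats c ∧
        (exc.length = pvM exc c ∨ exc.length = pvK cats c * pvM exc c)) := by
  unfold D_filter_data_categories
  constructor
  · rintro ⟨h, c, hc, hu, h2, hm⟩
    refine ⟨h, c, hc, hu, by rwa [count_eq_pvK cats c hu] at h2, ?_⟩
    rw [pvNp_countP_eq, count_eq_pvK cats c hu] at hm
    simpa using hm
  · rintro ⟨h, c, hc, hu, h2, hm⟩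
    refine ⟨h, c, hc, hu, by rwa [count_eq_pvK cats c hu], ?_⟩
    rw [pvNp_countP_eq, count_eq_pvK cats c hu]
    simpa using hm

lemma pvM_eq (exc : List String) (c : String) :
    pvM exc c = (exc.filter (fun e => !PySem.Str.startswith c e)).length := by
  rw [pvM, List.countP_eq_length_filter]
  congr 1
  apply List.filter_congr
  intro e _
  rw [sw_eq_decide]

-- count of c in one inner pass of A's nested comprehension
lemma count_filter_not_sw (U : List String) (e c : String) :
    (U.filter (fun x => !PySem.Str.startswith x e)).count c =
      if PySem.Str.startswith c e then 0 else U.count c := by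
  cases h : PySem.Str.startswith c e with
  | true =>
    rw [if_pos rfl]
    apply List.count_eq_zero_of_not_mem
    intro hm
    have h2 := (List.mem_filter.mp hm).2
    simp only [h, Bool.not_true] at h2
    exact Bool.false_ne_true h2
  | false =>
    rw [if_neg (by exact Bool.false_ne_true)]
    exact List.count_filter (by simp only [h, Bool.not_false])

lemma pvM_cons (e : String) (t : List String) (c : String) :
    pvM (e :: t) c = (if PySem.Str.startswith c e then 0 else 1) + pvM t c := by
  rw [pvM_eq, pvM_eq, List.filter_cons]
  cases h : PySem.Str.startswith c e with
  | true => simp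
  | false => simp; omega

-- count of c in A's duplicated_categories list
lemma count_duplicated (U : List String) (c : String) :
    ∀ (exc acc : List String),
      (exc.foldl (fun acc e => acc ++ U.filter (fun x => !PySem.Str.startswith x e)) acc).count c
        = acc.count c + U.count c * pvM exc c := by
  intro exc
  induction exc with
  | nil => intro acc; simp [pvM_eq]
  | cons e t ih =>
    intro acc
    rw [List.foldl_cons, ih, List.count_append, count_filter_not_sw, pvM_cons]
    cases h : PySem.Str.startswith c e with
    | true => simp
    | false => simp; ring

lemma pvK_pos_iff (categories : List String) (c : String) :
    0 < pvK categories c ↔ (c ∈ categories ∧ pvIsUser c = true) := by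
  rw [pvK_eq, List.count_pos_iff, List.mem_filter]

lemma pvM_eq_len_iff (exc : List String) (c : String) :
    pvM exc c = exc.length ↔ ∀ e ∈ exc, PySem.Str.startswith c e = false := by
  rw [pvM_eq, List.length_filter_eq_length_iff]
  simp

-- membership in A's result, for a non-empty exclusion list
lemma mem_A (categories exc : List String) (h : exc ≠ []) (c : String) :
    c ∈ filter_data_categories categories exc ↔
      pvK categories c * pvM exc c = exc.length := by
  unfold filter_data_categories
  rw [pvK_eq, if_pos h]
  rw [PySem.List.mem_sorted, PySem.Set.mem_ofList, List.mem_filter]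
  have hcnt := count_duplicated (categories.filter pvIsUser) c exc []
  simp only [List.count_nil, Nat.zero_add] at hcnt
  rw [hcnt]
  have hE : 0 < exc.length := List.length_pos_iff.mpr h
  constructor
  · rintro ⟨-, hb⟩
    exact beq_iff_eq.mp hb
  · intro hc
    refine ⟨?_, beq_iff_eq.mpr hc⟩
    rw [← List.count_pos_iff, hcnt]
    omega

-- membership in B's result, for a non-empty exclusion list
lemma mem_B (categories exc : List String) (h : exc ≠ []) (c : String) :
    c ∈ filter_data_categories_alt categories exc ↔
      0 < pvK categories c ∧ pvM exc c = exc.length := by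
  unfold filter_data_categories_alt
  rw [if_neg h]
  rw [PySem.List.mem_sorted, PySem.Set.mem_diff, PySem.Set.mem_ofList, PySem.Set.mem_ofList,
    pvM_eq_len_iff]
  constructor
  · rintro ⟨hU, hnr⟩
    refine ⟨by rw [pvK_eq, List.count_pos_iff]; exact hU, ?_⟩
    intro e he
    cases hb : PySem.Str.startswith c e with
    | false => rfl
    | true =>
      exfalso
      apply hnr
      rw [List.mem_filter]
      exact ⟨hU, List.any_eq_true.mpr ⟨e, he, hb⟩⟩
  · rintro ⟨hk, hall⟩
    have hU : c ∈ categories.filter pvIsUser := by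
      rw [← List.count_pos_iff]; rw [pvK_eq] at hk; exact hk
    refine ⟨hU, ?_⟩
    intro hmem
    rw [List.mem_filter] at hmem
    obtain ⟨e, he, hsw⟩ := List.any_eq_true.mp hmem.2
    rw [hall e he] at hsw
    exact Bool.false_ne_true hsw

lemma pairwise_lt_of_sorted_nodup (xs : List String) (hn : xs.Nodup) :
    (PySem.List.sorted xs (fun x => x) false).Pairwise (· < ·) := by
  have hle := PySem.List.sorted_pairwise xs (fun x => x)
  have hne : (PySem.List.sorted xs (fun x => x) false).Nodup :=
    (PySem.List.sorted_perm _ _ _).nodup_iff.mpr hn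
  exact (hle.and hne).imp (fun h => lt_of_le_of_ne h.1 h.2)

lemma pairwise_lt_A (categories exc : List String) (h : exc ≠ []) :
    (filter_data_categories categories exc).Pairwise (· < ·) := by
  unfold filter_data_categories
  rw [if_pos h]
  exact pairwise_lt_of_sorted_nodup _ (PySem.Set.nodup_ofList _)

lemma pairwise_lt_B (categories exc : List String) (h : exc ≠ []) :
    (filter_data_categories_alt categories exc).Pairwise (· < ·) := by
  unfold filter_data_categories_alt
  rw [if_neg h]
  exact pairwise_lt_of_sorted_nodup _ ((PySem.Set.nodup_ofList _).filter _)

-- ===== VERDICT (by name: the statement is the Claim_ definitions above) =====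
theorem filter_data_categories_spec : Claim_unchanged_filter_data_categories := by
  intro categories exc _ hD
  show filter_data_categories categories exc = filter_data_categories_alt categories exc
  by_cases h : exc = []
  · subst h
    rfl
  · have hE : 0 < exc.length := List.length_pos_iff.mpr h
    have hiff : ∀ c ∈ categories, 0 < pvK categories c →
        ((pvK categories c * pvM exc c = exc.length) ↔ (pvM exc c = exc.length)) := by
      intro c hc hk
      obtain ⟨-, hu⟩ := (pvK_pos_iff categories c).mp hk
      rcases Nat.lt_or_ge (pvK categories c) 2 with h1 | h2
      · have h1' : pvK categories c = 1 := by omega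
        rw [h1']; simp
      · constructor
        · intro hkm
          exact absurd ((D_iff categories exc).mpr ⟨h, c, hc, hu, h2, Or.inr hkm.symm⟩) hD
        · intro hm
          exact absurd ((D_iff categories exc).mpr ⟨h, c, hc, hu, h2, Or.inl hm.symm⟩) hD
    have hmem : ∀ c, c ∈ filter_data_categories categories exc ↔
        c ∈ filter_data_categories_alt categories exc := by
      intro c
      rw [mem_A categories exc h c, mem_B categories exc h c]
      constructor
      · intro hkm
        have hk : 0 < pvK categories c := by
          rcases Nat.eq_zero_or_pos (pvK categories c) with h0 | h0
          · rw [h0] at hkm; omega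
          · exact h0
        obtain ⟨hc, -⟩ := (pvK_pos_iff categories c).mp hk
        exact ⟨hk, (hiff c hc hk).mp hkm⟩
      · rintro ⟨hk, hm⟩
        obtain ⟨hc, -⟩ := (pvK_pos_iff categories c).mp hk
        exact (hiff c hc hk).mpr hm
    have hpA := pairwise_lt_A categories exc h
    have hpB := pairwise_lt_B categories exc h
    have nA : (filter_data_categories categories exc).Nodup := hpA.imp ne_of_lt
    have nB : (filter_data_categories_alt categories exc).Nodup := hpB.imp ne_of_lt
    exact List.Perm.eq_of_pairwise (fun a b _ _ h1 h2 => absurd h2 (not_lt_of_gt h1)) hpA hpB ((List.perm_ext_iff_of_nodup nA nB).mpr hmem)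

theorem filter_data_categories_changed : Claim_changed_filter_data_categories := by
  unfold Claim_changed_filter_data_categories; decide

theorem filter_data_categories_tight : Claim_exact_filter_data_categories := by
  intro categories exc _ hD heq
  obtain ⟨h, c, hc, -, hk2, hd⟩ := (D_iff categories exc).mp hD
  have hE : 0 < exc.length := List.length_pos_iff.mpr h
  have hA := mem_A categories exc h c
  have hB := mem_B categories exc h c
  rw [heq] at hA
  rw [hA] at hB
  by_cases hm : pvM exc c = exc.length
  · have hkm : pvK categories c * pvM exc c ≠ exc.length := by
      rw [hm]; intro hx
      rcases Nat.exists_eq_add_of_le hk2 with ⟨d, hd2⟩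
      rw [hd2, Nat.add_mul] at hx
      omega
    exact hkm (hB.mpr ⟨by omega, hm⟩)
  · have hkm : pvK categories c * pvM exc c = exc.length := by
      rcases hd with h1 | h1
      · exact absurd h1.symm hm
      · exact h1.symm
    exact hm (hB.mp hkm).2
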